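-- pv_equiv track=rewrite | github.com/Bogdanovmaksim/crypto_practises | pr3/main.py | encrypt_autokey_plain
-- ===== SOURCE A (Python) =====
-- ALPHABET = 'ABCDEFGHIJKLMNOPQRSTUVWXYZ'
--
-- ALPHABET_SIZE = 26
--
-- def to_num(c):
--     return ord(c) - ord('A')
--
-- def to_char(n):
--     return chr((n % ALPHABET_SIZE) + ord('A'))
--
-- def prepare(text):
--     return ''.join([c.upper() for c in text if c.upper() in ALPHABET])
--
-- def encrypt_autokey_plain(plain, key_char):
--     plain = prepare(plain)
--     key_char = prepare(key_char)
--     if not plain or not key_char: return ""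
--     result = to_char((to_num(plain[0]) + to_num(key_char)))
--     for i in range(1, len(plain)):
--         result += to_char((to_num(plain[i]) + to_num(plain[i - 1])))
--     return result
-- ===== SOURCE B (Python) =====
-- ALPHABET = 'ABCDEFGHIJKLMNOPQRSTUVWXYZ'
--
-- ALPHABET_SIZE = 26
--
-- def to_num(c):
--     return ord(c) - ord('A')
--
-- def to_char(n):
--     return chr((n % ALPHABET_SIZE) + ord('A'))
--
-- def prepare(text):
--     return ''.join([c.upper() for c in text if c.upper() in ALPHABET])
--
-- def encrypt_autokey_plain(plain, key_char):
--     plain = prepare(plain)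
--     key_char = prepare(key_char)
--     if not plain or not key_char:
--         return ""
--     # Divide and conquer: cipher letter i depends only on plaintext letters
--     # i and i-1, so each half can be encrypted independently once it is
--     # seeded with the number of the letter just before it.
--     def enc(seed, s):
--         if len(s) == 1:
--             return to_char(to_num(s[0]) + seed)
--         mid = len(s) // 2
--         return enc(seed, s[:mid]) + enc(to_num(s[mid - 1]), s[mid:])
--     return enc(to_num(key_char), plain)
-- ===== Notes on version B (the rewrite author's own statement) =====
-- stated objective: alternative
-- what changed: B replaces A's linear index loop (with its index-0 special case and plain[i-1] back-reference) by a divide-and-conquer recursion: each half of the plaintext is encrypted independently, seeded with the number of the letter just before it (the key for the leftmost half), exploiting that cipher letter i depends only on plaintext letters i and i-1.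
import Mathlib
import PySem

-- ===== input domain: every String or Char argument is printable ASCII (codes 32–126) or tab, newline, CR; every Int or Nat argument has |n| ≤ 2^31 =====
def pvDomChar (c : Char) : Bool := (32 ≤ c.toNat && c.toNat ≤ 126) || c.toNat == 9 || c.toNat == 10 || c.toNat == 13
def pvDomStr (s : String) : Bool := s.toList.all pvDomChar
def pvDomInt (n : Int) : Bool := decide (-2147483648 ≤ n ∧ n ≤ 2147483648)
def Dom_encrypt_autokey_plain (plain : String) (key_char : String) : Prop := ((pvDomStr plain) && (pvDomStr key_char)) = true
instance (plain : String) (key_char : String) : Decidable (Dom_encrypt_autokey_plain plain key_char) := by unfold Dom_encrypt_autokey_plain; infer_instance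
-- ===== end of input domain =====

-- B replaces A's linear index loop by a divide-and-conquer recursion: each half of the
-- plaintext is encrypted independently, seeded with the letter just before it (alternative
-- decomposition, same cost).

-- ===== PORT A =====
-- shared module helpers (prepare / to_num / to_char from Source A)
def pvKeep (c : Char) : Bool :=
  PySem.Chars.isIn [PySem.Chars.upperChar c] "ABCDEFGHIJKLMNOPQRSTUVWXYZ".toList

def pvPrepare (s : List Char) : List Char :=
  (s.filter pvKeep).map PySem.Chars.upperChar

def pvToNum (c : Char) : Int := (c.toNat : Int) - 65

def pvToChar (n : Int) : Char := Char.ofNat ((PySem.Int.mod n 26).toNat + 65)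

def encrypt_autokey_plain (plain : String) (key_char : String) : String :=
  let p := pvPrepare plain.toList
  let k := pvPrepare key_char.toList
  if p.isEmpty || k.isEmpty then "" else
    -- to_num(key_char): ord of a whole string raises TypeError unless it has one char; Pre_
    -- excludes the rest, so inside Pre_ (and this branch) k is exactly [its one char] = [k.headD _]
    let kn : Int := pvToNum (k.headD 'A')
    let first : List Char := [pvToChar (pvToNum (p.headD 'A') + kn)]
    let result := (PySem.List.pyRange 1 (PySem.List.len p) 1).foldl
      (fun acc i => acc ++
        [pvToChar (pvToNum (PySem.List.pyGetD p i 'A') + pvToNum (PySem.List.pyGetD p (i - 1) 'A'))])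
      first
    String.ofList result

-- ===== PORT B =====
-- B's own copies of the module helpers (same bodies as Source A's helpers, which Source B reuses verbatim)
def pvKeepB (c : Char) : Bool :=
  PySem.Chars.isIn [PySem.Chars.upperChar c] "ABCDEFGHIJKLMNOPQRSTUVWXYZ".toList

def pvPrepareB (s : List Char) : List Char :=
  (s.filter pvKeepB).map PySem.Chars.upperChar

def pvToNumB (c : Char) : Int := (c.toNat : Int) - 65

def pvToCharB (n : Int) : Char := Char.ofNat ((PySem.Int.mod n 26).toNat + 65)

-- Source B's inner `enc(seed, s)`: divide and conquer over the plaintext segment.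
-- enc is only ever called on non-empty segments; the [] branch is the unreachable
-- total extension. s[mid-1] is provably in range (1 ≤ mid < len), so getD is exact here.
def pvEncB (seed : Int) (s : List Char) : List Char :=
  if _h : s.length ≤ 1 then
    match s with
    | [] => []
    | c :: _ => [pvToCharB (pvToNumB c + seed)]
  else
    pvEncB seed (s.take (s.length / 2)) ++
    pvEncB (pvToNumB (s.getD (s.length / 2 - 1) 'A')) (s.drop (s.length / 2))
termination_by s.length
decreasing_by
  · simp only [List.length_take]; omega
  · simp only [List.length_drop]; omega

def encrypt_autokey_plain_alt (plain : String) (key_char : String) : String :=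
  let p := pvPrepareB plain.toList
  let k := pvPrepareB key_char.toList
  if p.isEmpty || k.isEmpty then "" else
    -- to_num(key_char) on the whole prepared key: one char under Pre_, = k.headD _
    String.ofList (pvEncB (pvToNumB (k.headD 'A')) p)

-- ===== PRECONDITION & SPEC =====
-- Pre_ excludes exactly the inputs where the prepared key has two or more letters while the
-- prepared plaintext is non-empty: there A (and B) raises TypeError from ord(key_char) on a
-- multi-character string (with no letters in the plaintext both return "" before reaching ord).
def pvKeepPre (c : Char) : Bool :=
  PySem.Chars.isIn [PySem.Chars.upperChar c] "ABCDEFGHIJKLMNOPQRSTUVWXYZ".toList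

def Pre_encrypt_autokey_plain (plain : String) (key_char : String) : Prop :=
  (key_char.toList.filter pvKeepPre).length <= 1 ∨ (plain.toList.filter pvKeepPre).length = 0
instance (plain : String) (key_char : String) : Decidable (Pre_encrypt_autokey_plain plain key_char) := by unfold Pre_encrypt_autokey_plain; infer_instance

def pvWitness_encrypt_autokey_plain : String × String := ("Hello, World!", "k")

def Spec_encrypt_autokey_plain (plain : String) (key_char : String) (out : String) : Prop := out = encrypt_autokey_plain_alt plain key_char
instance (plain : String) (key_char : String) (out : String) : Decidable (Spec_encrypt_autokey_plain plain key_char out) := by unfold Spec_encrypt_autokey_plain; infer_instance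

-- ===== CLAIM (what is proved, stated in full; the proofs are below) =====
def Claim_equal_encrypt_autokey_plain : Prop := ∀ (plain : String) (key_char : String), Dom_encrypt_autokey_plain plain key_char → Pre_encrypt_autokey_plain plain key_char → Spec_encrypt_autokey_plain plain key_char (encrypt_autokey_plain plain key_char)

-- ===== LEMMAS AND PROOFS =====
-- proof-side linear recursion: the common characterisation both ports are reduced to
def pvGo : Int → List Char → List Char
  | _, [] => []
  | prev, c :: rest => pvToChar (pvToNum c + prev) :: pvGo (pvToNum c) rest

lemma pvGo_eq_zip (l : List Char) (prev : Int) :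
    pvGo prev l = (l.zip (prev :: l.dropLast.map pvToNum)).map
      (fun pk => pvToChar (pvToNum pk.1 + pk.2)) := by
  induction l generalizing prev with
  | nil => simp [pvGo]
  | cons c rest ih =>
    cases rest with
    | nil => simp [pvGo]
    | cons d r =>
      show pvToChar (pvToNum c + prev) :: pvGo (pvToNum c) (d :: r) = _
      rw [ih (pvToNum c)]
      simp [List.dropLast_cons₂]

lemma pv_main (c0 : Char) (rest : List Char) (kn : Int) :
    (PySem.List.pyRange 1 (PySem.List.len (c0 :: rest)) 1).foldl
      (fun acc i => acc ++
        [pvToChar (pvToNum (PySem.List.pyGetD (c0 :: rest) i 'A') + pvToNum (PySem.List.pyGetD (c0 :: rest) (i - 1) 'A'))])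
      [pvToChar (pvToNum c0 + kn)]
    = ((c0 :: rest).zip (kn :: ((c0 :: rest).dropLast.map pvToNum))).map
        (fun pk => pvToChar (pvToNum pk.1 + pk.2)) := by
  rw [PySem.List.foldl_append_singleton_eq_map]
  have hlen : (PySem.List.len (c0 :: rest) - 1).toNat = rest.length := by
    simp [PySem.List.len_eq]
  rw [PySem.List.pyRange_one, hlen]
  simp only [List.zip_cons_cons, List.map_cons, List.map_map, List.singleton_append]
  congr 1
  apply List.ext_getElem
  · simp [List.length_zip]
  · intro j hj hj2
    simp only [List.getElem_map, List.getElem_range, Function.comp_apply, List.getElem_zip]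
    have hj' : j < rest.length := by simpa using hj
    have h1 : (1 : Int) + (j : Int) = ((j+1 : Nat) : Int) := by push_cast; ring
    rw [h1, PySem.List.pyGetD_natCast]
    have h2 : ((j+1 : Nat) : Int) - 1 = ((j : Nat) : Int) := by push_cast; ring
    rw [h2, PySem.List.pyGetD_natCast]
    have hd : j < (c0 :: rest).dropLast.length := by simp [hj']
    have hlt : j < (c0 :: rest).length := by simp; omega
    simp [List.getElem?_eq_getElem hlt, hj', List.getElem_dropLast]

lemma pvGo_append (a : List Char) (b : List Char) (seed : Int) (h : a ≠ []) :
    pvGo seed (a ++ b) = pvGo seed a ++ pvGo (pvToNum (a.getLast h)) b := by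
  induction a generalizing seed with
  | nil => exact absurd rfl h
  | cons c a' ih =>
    cases a' with
    | nil => simp [pvGo]
    | cons d r =>
      have h0 : pvGo seed ((c :: d :: r) ++ b)
          = pvToChar (pvToNum c + seed) :: pvGo (pvToNum c) ((d :: r) ++ b) := rfl
      rw [h0, ih (pvToNum c) (by simp), List.getLast_cons (a := c) (by simp)]
      rfl

lemma pvEncB_eq_go : ∀ (n : Nat) (s : List Char) (seed : Int), s.length = n → s ≠ [] →
    pvEncB seed s = pvGo seed s := by
  intro n
  induction n using Nat.strong_induction_on with
  | _ n ih =>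
    intro s seed hlen hne
    rw [pvEncB]
    by_cases h1 : s.length ≤ 1
    · rw [dif_pos h1]
      match s, hne with
      | c :: rest, _ =>
        have : rest = [] := by
          cases rest with
          | nil => rfl
          | cons _ _ => simp at h1
        subst this
        simp [pvGo, show pvToCharB = pvToChar from rfl, show pvToNumB = pvToNum from rfl]
    · rw [dif_neg h1]
      have hlen2 : 2 ≤ s.length := by omega
      set m := s.length / 2 with hm
      have hm1 : 1 ≤ m := by omega
      have hmlt : m < s.length := by omega
      have htake : (s.take m).length = m := by simp; omega
      have hdrop : (s.drop m).length = s.length - m := by simp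
      have htne : s.take m ≠ [] := by
        intro hc; rw [hc] at htake; simp at htake; omega
      have hdne : s.drop m ≠ [] := by
        intro hc; rw [hc] at hdrop; simp at hdrop; omega
      have e1 := ih m (by omega) (s.take m) seed htake htne
      have e2 := ih (s.length - m) (by omega) (s.drop m)
        (pvToNumB (s.getD (m - 1) 'A')) hdrop hdne
      rw [e1, e2]
      have hgl : s.getD (m - 1) 'A' = (s.take m).getLast htne := by
        rw [List.getLast_eq_getElem, List.getD_eq_getElem _ _ (show m - 1 < s.length by omega)]
        simp only [htake, List.getElem_take]
      rw [show pvToNumB = pvToNum from rfl, hgl,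
        ← pvGo_append (s.take m) (s.drop m) seed htne, List.take_append_drop]

theorem encrypt_autokey_plain_spec : Claim_equal_encrypt_autokey_plain := by
  intro plain key_char _hd hpre
  show encrypt_autokey_plain plain key_char = encrypt_autokey_plain_alt plain key_char
  cases hp : pvPrepare plain.toList with
  | nil => simp [encrypt_autokey_plain, encrypt_autokey_plain_alt,
      show pvPrepareB = pvPrepare from rfl, hp]
  | cons c0 rest =>
    cases hk : pvPrepare key_char.toList with
    | nil => simp [encrypt_autokey_plain, encrypt_autokey_plain_alt,
        show pvPrepareB = pvPrepare from rfl, hk]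
    | cons kc ktail =>
      simp only [encrypt_autokey_plain, encrypt_autokey_plain_alt,
        show pvPrepareB = pvPrepare from rfl, show pvToNumB = pvToNum from rfl,
        hp, hk,
        List.isEmpty_cons, Bool.or_self, Bool.false_eq_true, if_false]
      rw [pvEncB_eq_go (c0 :: rest).length (c0 :: rest) _ rfl (by simp),
        pvGo_eq_zip, List.headD_cons, List.headD_cons]
      exact congrArg String.ofList (pv_main c0 rest (pvToNum kc))
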